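-- pv_equiv track=rewrite | github.com/bhaveshgoyal27/DSA-Collection | backtracking/imp_letter_combination.py | letter_combination
-- ===== SOURCE A (Python) =====
-- def letter_combination(n: int) -> list[str]:
--     path =[""]
--     for _ in range(n):
--         t = []
--         for i in path:
--             t.append(i+"a")
--             t.append(i+"b")
--         path = t
--     return path
-- ===== SOURCE B (Python) =====
-- def letter_combination(n: int) -> list[str]:
--     def helper(prefix: str, remaining: int) -> list[str]:
--         if remaining <= 0:
--             return [prefix]
--         return helper(prefix + "a", remaining - 1) + helper(prefix + "b", remaining - 1)
--     return helper("", n)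
-- ===== Notes on version B (the rewrite author's own statement) =====
-- stated objective: alternative
-- what changed: Replaced the iterative level-by-level rebuild (n passes, each rebuilding the whole list by appending a suffix character) with a recursive backtracking helper that chooses the first character and concatenates the two recursive sublists.
import Mathlib
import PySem

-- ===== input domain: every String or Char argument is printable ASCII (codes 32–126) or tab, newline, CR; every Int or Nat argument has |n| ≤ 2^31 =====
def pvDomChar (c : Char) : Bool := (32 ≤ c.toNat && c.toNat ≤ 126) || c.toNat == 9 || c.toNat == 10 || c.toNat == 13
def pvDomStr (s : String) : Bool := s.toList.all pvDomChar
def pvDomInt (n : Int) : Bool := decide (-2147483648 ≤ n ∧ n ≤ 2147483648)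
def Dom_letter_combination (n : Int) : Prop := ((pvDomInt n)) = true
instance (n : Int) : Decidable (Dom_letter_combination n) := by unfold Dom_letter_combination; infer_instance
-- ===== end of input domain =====

-- B replaces A's iterative level-by-level rebuild with recursive backtracking on the
-- first character (alternative decomposition, same cost); return values proved equal for all n.

-- ===== PORT A =====
def letter_combination (n : Int) : List String :=
  (PySem.List.pyRange 0 n 1).foldl
    (fun path _ => path.foldl (fun t i => t ++ [i ++ "a", i ++ "b"]) []) [""]

-- ===== PORT B =====
def lcHelper (pfx : String) (remaining : Int) : List String :=
  if remaining ≤ 0 then [pfx]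
  else lcHelper (pfx ++ "a") (remaining - 1) ++ lcHelper (pfx ++ "b") (remaining - 1)
termination_by remaining.toNat
decreasing_by all_goals omega

def letter_combination_alt (n : Int) : List String := lcHelper "" n

-- ===== PRECONDITION & SPEC =====
def Spec_letter_combination (n : Int) (out : List String) : Prop := out = letter_combination_alt n
instance (n : Int) (out : List String) : Decidable (Spec_letter_combination n out) := by unfold Spec_letter_combination; infer_instance

-- ===== CLAIM (what is proved, stated in full; the proofs are below) =====
def Claim_equal_letter_combination : Prop := ∀ (n : Int), Dom_letter_combination n → Spec_letter_combination n (letter_combination n)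

-- ===== LEMMAS AND PROOFS =====

-- first-character enumeration of all length-k strings over {a,b}, lex order
def lcF : Nat → List String
  | 0 => [""]
  | k + 1 => (lcF k).map (fun s => "a" ++ s) ++ (lcF k).map (fun s => "b" ++ s)

-- one round of A's loop
def lcStep (path : List String) : List String := path.flatMap (fun i => [i ++ "a", i ++ "b"])

theorem lcStep_map_pre (c : String) (xs : List String) :
    lcStep (xs.map (fun s => c ++ s)) = (lcStep xs).map (fun s => c ++ s) := by
  simp [lcStep, List.flatMap_map, List.map_flatMap, String.append_assoc]

theorem lcStep_lcF (k : Nat) : lcStep (lcF k) = lcF (k + 1) := by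
  induction k with
  | zero => decide
  | succ k ih =>
    show lcStep ((lcF k).map _ ++ (lcF k).map _) = _
    rw [lcStep, List.flatMap_append, ← lcStep, ← lcStep, lcStep_map_pre, lcStep_map_pre, ih]
    rfl

theorem foldl_lcStep (l : List Int) (k : Nat) :
    l.foldl (fun p _ => lcStep p) (lcF k) = lcF (k + l.length) := by
  induction l generalizing k with
  | nil => simp
  | cons x xs ih =>
    simp only [List.foldl_cons, lcStep_lcF, ih, List.length_cons]
    congr 1; omega

theorem letter_combination_eq_lcF (n : Int) : letter_combination n = lcF n.toNat := by
  unfold letter_combination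
  have hbody : (fun (path : List String) (_ : Int) =>
      path.foldl (fun t i => t ++ [i ++ "a", i ++ "b"]) []) = fun p _ => lcStep p := by
    funext p x
    rw [PySem.List.foldl_append_eq_flatMap]
    rfl
  rw [hbody]
  have := foldl_lcStep (PySem.List.pyRange 0 n 1) 0
  simpa [PySem.List.length_pyRange_one] using this

theorem lcHelper_eq (k : Nat) : ∀ p : String, lcHelper p (k : Int) = (lcF k).map (fun s => p ++ s) := by
  induction k with
  | zero => intro p; rw [lcHelper]; simp [lcF]
  | succ k ih =>
    intro p
    rw [lcHelper]
    have h1 : ¬ ((k + 1 : Nat) : Int) ≤ 0 := by push_cast; omega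
    have h2 : ((k + 1 : Nat) : Int) - 1 = (k : Int) := by push_cast; ring
    simp only [h1, if_false, h2, ih]
    simp [lcF, List.map_map, Function.comp_def, String.append_assoc]

theorem alt_eq_lcF (n : Int) : letter_combination_alt n = lcF n.toNat := by
  unfold letter_combination_alt
  by_cases h : n ≤ 0
  · rw [lcHelper]
    simp only [h, if_true]
    have : n.toNat = 0 := by omega
    rw [this]; rfl
  · have hn : ((n.toNat : Nat) : Int) = n := by omega
    rw [← hn, lcHelper_eq]
    simp only [String.empty_append, List.map_id_fun']
    congr 1

-- ===== VERDICT (by name: the statement is the Claim_ definition above) =====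
theorem letter_combination_spec : Claim_equal_letter_combination := by
  intro n _
  show letter_combination n = letter_combination_alt n
  rw [letter_combination_eq_lcF, alt_eq_lcF]
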